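-- pv_equiv track=rewrite | github.com/SixpennyYard/7-Wonders | src/main.py | green_score_fonc
-- ===== SOURCE A (Python) =====
-- def green_score_fonc(nb_engrenage, nb_tablette, nb_compas):
--     green_scoreok = 0
--     if nb_engrenage == 1:
--         green_scoreok += 1
--     elif nb_engrenage == 2:
--         green_scoreok += 4
--     elif nb_engrenage == 3:
--         green_scoreok += 9
--     elif nb_engrenage == 4:
--         green_scoreok += 16
--     if nb_tablette == 1:
--         green_scoreok += 1
--     elif nb_tablette == 2:
--         green_scoreok += 4
--     elif nb_tablette == 3:
--         green_scoreok += 9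
--     elif nb_tablette == 4:
--         green_scoreok += 16
--     if nb_compas == 1:
--         green_scoreok += 1
--     elif nb_compas == 2:
--         green_scoreok += 4
--     elif nb_compas == 3:
--         green_scoreok += 9
--     elif nb_compas == 4:
--         green_scoreok += 16
--
--     while nb_engrenage > 0 and nb_tablette > 0 and nb_compas > 0:
--         nb_engrenage -= 1
--         nb_tablette -= 1
--         nb_compas -= 1
--         green_scoreok += 7
--
--     return green_scoreok
-- ===== SOURCE B (Python) =====
-- def green_score_fonc(nb_engrenage, nb_tablette, nb_compas):
--     table = {1: 1, 2: 4, 3: 9, 4: 16}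
--     score = sum(table.get(v, 0) for v in [nb_engrenage, nb_tablette, nb_compas])
--     return score + 7 * max(0, min(nb_engrenage, nb_tablette, nb_compas))
-- ===== Notes on version B (the rewrite author's own statement) =====
-- stated objective: simpler
-- what changed: Replaces the three elif chains by one loop over a bonus table {1:1,2:4,3:9,4:16} and the decrementing while loop by the closed form 7*max(0,min(e,t,c)).
import Mathlib
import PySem

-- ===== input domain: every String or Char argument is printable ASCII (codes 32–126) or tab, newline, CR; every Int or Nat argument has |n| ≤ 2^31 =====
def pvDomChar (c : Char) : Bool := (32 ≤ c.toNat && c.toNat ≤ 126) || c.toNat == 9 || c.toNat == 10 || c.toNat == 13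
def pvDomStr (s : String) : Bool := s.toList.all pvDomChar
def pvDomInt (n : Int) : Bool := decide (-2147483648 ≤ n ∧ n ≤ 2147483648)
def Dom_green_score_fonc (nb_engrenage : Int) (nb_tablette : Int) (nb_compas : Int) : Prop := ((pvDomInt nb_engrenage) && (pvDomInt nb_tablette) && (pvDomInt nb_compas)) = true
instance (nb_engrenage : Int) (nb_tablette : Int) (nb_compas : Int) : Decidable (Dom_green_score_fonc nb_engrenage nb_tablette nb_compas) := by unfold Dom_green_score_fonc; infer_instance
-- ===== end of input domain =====

-- B replaces A's three elif chains by one table-driven loop and A's decrementing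
-- while loop by the closed form 7*max(0,min(e,t,c)); simpler and O(1).

-- ===== PORT A =====
-- the decrementing while loop of A
def green_score_fonc_loop (e t c acc : Int) : Int :=
  if 0 < e ∧ 0 < t ∧ 0 < c then
    green_score_fonc_loop (e - 1) (t - 1) (c - 1) (acc + 7)
  else acc
termination_by e.toNat
decreasing_by omega

def green_score_fonc (nb_engrenage : Int) (nb_tablette : Int) (nb_compas : Int) : Int :=
  let g0 : Int := 0
  let g1 : Int := g0 + (if nb_engrenage = 1 then 1 else if nb_engrenage = 2 then 4
                        else if nb_engrenage = 3 then 9 else if nb_engrenage = 4 then 16 else 0)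
  let g2 : Int := g1 + (if nb_tablette = 1 then 1 else if nb_tablette = 2 then 4
                        else if nb_tablette = 3 then 9 else if nb_tablette = 4 then 16 else 0)
  let g3 : Int := g2 + (if nb_compas = 1 then 1 else if nb_compas = 2 then 4
                        else if nb_compas = 3 then 9 else if nb_compas = 4 then 16 else 0)
  green_score_fonc_loop nb_engrenage nb_tablette nb_compas g3

-- ===== PORT B =====
-- Python dict literal {1:1,2:4,3:9,4:16} (distinct keys)
def pvBonusTable : PySem.Dict Int Int := PySem.Dict.mk [(1, 1), (2, 4), (3, 9), (4, 16)]

def green_score_fonc_alt (nb_engrenage : Int) (nb_tablette : Int) (nb_compas : Int) : Int :=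
  let score : Int :=
    ([nb_engrenage, nb_tablette, nb_compas].map (fun v => pvBonusTable.getD v 0)).sum
  score + 7 * max 0 (min nb_engrenage (min nb_tablette nb_compas))

-- ===== PRECONDITION & SPEC =====
def Spec_green_score_fonc (nb_engrenage : Int) (nb_tablette : Int) (nb_compas : Int) (out : Int) : Prop := out = green_score_fonc_alt nb_engrenage nb_tablette nb_compas
instance (nb_engrenage : Int) (nb_tablette : Int) (nb_compas : Int) (out : Int) : Decidable (Spec_green_score_fonc nb_engrenage nb_tablette nb_compas out) := by unfold Spec_green_score_fonc; infer_instance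

-- ===== CLAIM (what is proved, stated in full; the proofs are below) =====
def Claim_equal_green_score_fonc : Prop := ∀ (nb_engrenage : Int) (nb_tablette : Int) (nb_compas : Int), Dom_green_score_fonc nb_engrenage nb_tablette nb_compas → Spec_green_score_fonc nb_engrenage nb_tablette nb_compas (green_score_fonc nb_engrenage nb_tablette nb_compas)

-- ===== LEMMAS AND PROOFS =====

-- the table lookup of B as a case split
theorem pvBonusTable_getD (v : Int) :
    pvBonusTable.getD v 0 = (if v = 1 then 1 else if v = 2 then 4
                             else if v = 3 then 9 else if v = 4 then 16 else (0 : Int)) := by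
  simp only [pvBonusTable, PySem.Dict.getD, PySem.Dict.get?_mk_cons, beq_iff_eq]
  split_ifs <;> first | rfl | omega

-- A's while loop adds 7 exactly max 0 (min e (min t c)) times
theorem green_score_fonc_loop_closed (e t c acc : Int) :
    green_score_fonc_loop e t c acc = acc + 7 * max 0 (min e (min t c)) := by
  fun_induction green_score_fonc_loop e t c acc with
  | case1 e t c acc h ih => rw [ih]; omega
  | case2 e t c acc h => omega

-- ===== VERDICT (by name: the statement is the Claim_ definition above) =====
theorem green_score_fonc_spec : Claim_equal_green_score_fonc := by
  intro e t c _
  unfold Spec_green_score_fonc green_score_fonc green_score_fonc_alt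
  rw [green_score_fonc_loop_closed]
  simp only [List.map, List.sum_cons, List.sum_nil, pvBonusTable_getD]
  split_ifs <;> omega
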